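-- pv_equiv track=rewrite | github.com/balaun/aoc2021 | day14/day14.py | apply_polymerization
-- ===== SOURCE A (Python) =====
-- def apply_polymerization(chain, ops):
--     retval = list()
--
--     for i in range(0, len(chain)-1):
--         pair = chain[i] + chain[i+1]
--         retval.append(chain[i])
--         retval.append(ops[pair])
--     retval.append(chain[len(chain)-1])
--     return retval
-- ===== SOURCE B (Python) =====
-- def apply_polymerization(chain, ops):
--     # Recursive decomposition: a one-element chain is its own expansion;
--     # otherwise emit the head and the inserted element, then recurse on the tail.
--     if len(chain) == 1:
--         return [chain[0]]
--     return [chain[0], ops[chain[0] + chain[1]]] + apply_polymerization(chain[1:], ops)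
-- ===== Notes on version B (the rewrite author's own statement) =====
-- stated objective: alternative
-- what changed: B is a structural recursion on the chain (base case: singleton; step: emit head and inserted element, recurse on the tail) instead of A's iterative index loop over range(len(chain)-1) with an accumulator list and a final append.
import Mathlib
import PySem

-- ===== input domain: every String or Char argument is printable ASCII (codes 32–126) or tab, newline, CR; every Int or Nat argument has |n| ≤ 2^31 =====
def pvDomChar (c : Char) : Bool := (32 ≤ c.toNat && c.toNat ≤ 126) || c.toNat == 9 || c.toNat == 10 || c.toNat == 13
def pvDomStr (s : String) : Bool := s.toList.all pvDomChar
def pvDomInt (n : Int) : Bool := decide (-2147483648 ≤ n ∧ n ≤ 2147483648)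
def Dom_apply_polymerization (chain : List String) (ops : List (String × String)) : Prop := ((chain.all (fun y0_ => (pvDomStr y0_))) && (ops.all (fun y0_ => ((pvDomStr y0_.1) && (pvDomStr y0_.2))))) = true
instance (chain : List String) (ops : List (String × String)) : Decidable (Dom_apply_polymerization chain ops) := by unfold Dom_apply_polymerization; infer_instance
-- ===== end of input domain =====

-- B expands the polymer by structural recursion on the chain (singleton base case, head+insert then recurse on the tail) instead of A's index loop with an accumulator and final append; same cost, different decomposition.


-- ===== PORT A =====
-- A: index loop over range(0, len(chain)-1), emitting chain[i] and ops[chain[i]+chain[i+1]]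
-- as it goes, then appending chain[len(chain)-1]. dict lookups via Dict.ofList; missing keys
-- (KeyError) and empty chain (IndexError) are excluded by Pre_, so getD's default never fires.
def apply_polymerization (chain : List String) (ops : List (String × String)) : List String :=
  let d := PySem.Dict.ofList ops
  let retval :=
    (PySem.List.pyRange 0 ((chain.length : Int) - 1) 1).foldl
      (fun r i =>
        let pair := PySem.List.pyGetD chain i "" ++ PySem.List.pyGetD chain (i + 1) ""
        r ++ [PySem.List.pyGetD chain i "", d.getD pair ""]) []
  retval ++ [PySem.List.pyGetD chain ((chain.length : Int) - 1) ""]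

-- ===== PORT B =====
-- B: structural recursion. [x] expands to [x]; a :: b :: t expands to
-- a :: ops[a+b] :: expansion of (b :: t). On [] the Python B raises (chain[0]),
-- which Pre_ excludes; the port returns [] there (never reached under Pre_).
def pvExpand (d : PySem.Dict String String) : List String → List String
  | [] => []
  | [x] => [x]
  | a :: b :: t => a :: d.getD (a ++ b) "" :: pvExpand d (b :: t)

def apply_polymerization_alt (chain : List String) (ops : List (String × String)) : List String :=
  pvExpand (PySem.Dict.ofList ops) chain

-- ===== PRECONDITION & SPEC =====
-- Pre_ excludes exactly the inputs where the Python A raises: the empty chain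
-- (IndexError) and chains with an adjacent pair missing from ops (KeyError).
def Pre_apply_polymerization (chain : List String) (ops : List (String × String)) : Prop :=
  chain ≠ [] ∧ ∀ p ∈ chain.zip (chain.drop 1),
    ((PySem.Dict.ofList ops).get? (p.1 ++ p.2)).isSome = true
instance (chain : List String) (ops : List (String × String)) : Decidable (Pre_apply_polymerization chain ops) := by unfold Pre_apply_polymerization; infer_instance

def pvWitness_apply_polymerization : List String × (List (String × String)) :=
  (["A", "B", "A"], [("AB", "X"), ("BA", "Y")])

def Spec_apply_polymerization (chain : List String) (ops : List (String × String)) (out : List String) : Prop := out = apply_polymerization_alt chain ops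
instance (chain : List String) (ops : List (String × String)) (out : List String) : Decidable (Spec_apply_polymerization chain ops out) := by unfold Spec_apply_polymerization; infer_instance

-- ===== CLAIM (what is proved, stated in full; the proofs are below) =====
def Claim_equal_apply_polymerization : Prop := ∀ (chain : List String) (ops : List (String × String)), Dom_apply_polymerization chain ops → Pre_apply_polymerization chain ops → Spec_apply_polymerization chain ops (apply_polymerization chain ops)

-- ===== LEMMAS AND PROOFS =====

-- A's interleaved fold body without the final element
def pvCore (d : PySem.Dict String String) : List String → List String
  | [] => []
  | [_] => []
  | a :: b :: t => a :: d.getD (a ++ b) "" :: pvCore d (b :: t)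

theorem pvCore_A (d : PySem.Dict String String) (xs : List String) :
    ∀ acc : List String,
      (List.range (xs.length - 1)).foldl
        (fun r k => r ++ [xs.getD k "", d.getD (xs.getD k "" ++ xs.getD (k + 1) "") ""]) acc
      = acc ++ pvCore d xs := by
  induction xs with
  | nil => intro acc; simp [pvCore]
  | cons a rest ih =>
    intro acc
    cases rest with
    | nil => simp [pvCore]
    | cons b t =>
      rw [show (a :: b :: t).length - 1 = (b :: t).length - 1 + 1 by simp,
          List.range_succ_eq_map, List.foldl_cons, List.foldl_map]
      simp only [List.getD_cons_succ, List.getD_cons_zero] at ih ⊢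
      rw [ih (acc ++ [a, d.getD (a ++ b) ""])]
      simp [pvCore]

-- B's recursion equals A's core plus the last element, for nonempty chains
theorem pvExpand_eq (d : PySem.Dict String String) (xs : List String) (h : xs ≠ []) :
    pvExpand d xs = pvCore d xs ++ [xs.getLast h] := by
  induction xs with
  | nil => exact absurd rfl h
  | cons a rest ih =>
    cases rest with
    | nil => simp [pvExpand, pvCore]
    | cons b t =>
      simp only [pvExpand, pvCore]
      rw [ih (by simp)]
      simp [List.getLast_cons]

-- ===== VERDICT (by name: the statement is the Claim_ definition above) =====
theorem apply_polymerization_spec : Claim_equal_apply_polymerization := by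
  intro chain ops _hdom hpre
  obtain ⟨hne, -⟩ := hpre
  unfold Spec_apply_polymerization apply_polymerization apply_polymerization_alt
  set d := PySem.Dict.ofList ops with hd
  have hlen : 1 ≤ chain.length := List.length_pos_of_ne_nil hne
  have hlast : PySem.List.pyGetD chain ((chain.length : Int) - 1) "" = chain.getLast hne := by
    have h1 : (0 : Int) ≤ (chain.length : Int) - 1 := by omega
    have h2 : (chain.length : Int) - 1 < (chain.length : Int) := by omega
    rw [PySem.List.pyGetD_eq_getElem chain "" h1 h2, List.getLast_eq_getElem]
    congr 1
    omega
  have hA :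
      (PySem.List.pyRange 0 ((chain.length : Int) - 1) 1).foldl
        (fun r i =>
          let pair := PySem.List.pyGetD chain i "" ++ PySem.List.pyGetD chain (i + 1) ""
          r ++ [PySem.List.pyGetD chain i "", d.getD pair ""]) []
      = pvCore d chain := by
    rw [PySem.List.pyRange_one, List.foldl_map]
    have hnat : (((chain.length : Int) - 1) - 0).toNat = chain.length - 1 := by omega
    rw [hnat]
    have hfun : ∀ (r : List String) (k : ℕ),
        (fun r (i : Int) =>
          let pair := PySem.List.pyGetD chain i "" ++ PySem.List.pyGetD chain (i + 1) ""
          r ++ [PySem.List.pyGetD chain i "", d.getD pair ""]) r ((0 : Int) + k)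
        = r ++ [chain.getD k "", d.getD (chain.getD k "" ++ chain.getD (k + 1) "") ""] := by
      intro r k
      have h1 : ((0 : Int) + k) = ((k : ℕ) : Int) := by omega
      have h2 : ((k : ℕ) : Int) + 1 = (((k + 1 : ℕ)) : Int) := by push_cast; ring
      simp only [h1, h2, PySem.List.pyGetD_natCast]
    calc (List.range (chain.length - 1)).foldl
          (fun r (k : ℕ) =>
            (fun r (i : Int) =>
              let pair := PySem.List.pyGetD chain i "" ++ PySem.List.pyGetD chain (i + 1) ""
              r ++ [PySem.List.pyGetD chain i "", d.getD pair ""]) r ((0 : Int) + k)) []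
        = (List.range (chain.length - 1)).foldl
            (fun r k => r ++ [chain.getD k "", d.getD (chain.getD k "" ++ chain.getD (k + 1) "") ""]) [] := by
          exact List.foldl_ext _ _ [] (fun r k _ => hfun r k)
      _ = pvCore d chain := by rw [pvCore_A]; simp
  simp only [hA, hlast, pvExpand_eq d chain hne]
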